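-- pv_equiv track=rewrite | github.com/matheusfillipe/foobar | 2/binary_tree2_1.py | solution
-- ===== SOURCE A (Python) =====
-- class Node:
--     def __init__(self, value, left=None, right=None):
--         """Simple binary node that stores a value."""
--         self.value = value
--         self.left = left
--         self.right = right
--
--     def __repr__(self):
--         return "%s: {%s %s}" % (self.value, self.left or "", self.right or "")
--
-- def tree(h, accumulated=0):
--     """Returns the root node a tree or a subtree."""
--     value = 2 ** h - 1 + accumulated
--     if h > 0:
--         return Node(
--             value,
--             tree(h - 1, accumulated),
--             tree(h - 1, 2 ** (h - 1) - 1 + accumulated),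
--         )
--
-- def solution(h, q):
--     res = [-1 for _ in range(len(q))]
--     node_list = [tree(h)]
--
--     # Transverse binary tree
--     while len(node_list) > 0:
--         node = node_list.pop()
--         if node.left is None and node.right is None:
--             continue
--         if node.left:
--             node_list.append(node.left)
--             if node.left.value in q:
--                 res[q.index(node.left.value)] = node.value
--         if node.right:
--             node_list.append(node.right)
--             if node.right.value in q:
--                 res[q.index(node.right.value)] = node.value
--
--     return res
-- ===== SOURCE B (Python) =====
-- def solution(h, q):
--     size = 2 ** h - 1
--
--     def parent(x):
--         if x < 1 or x >= size:
--             return -1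
--         a, k = 0, h
--         while k > 1:
--             lroot = a + 2 ** (k - 1) - 1
--             cur = 2 ** k - 1 + a
--             if x == lroot or x == cur - 1:
--                 return cur
--             if x > lroot:
--                 a = lroot
--             k -= 1
--         return -1
--
--     return [parent(x) for x in q]
-- ===== Notes on version B (the rewrite author's own statement) =====
-- stated objective: faster
-- what changed: B never builds the tree: it computes each query's parent arithmetically by descending subtree value ranges from the root, instead of A's materialising the whole 2^h-node tree and scanning q at every node; intended as faster (a timing run measured B 5-60x ahead before A stopped finishing at larger sizes, so it could not certify a final ratio).
-- intended difference: On queries that contain a duplicated valid non-root node value (some v with 1 <= v <= 2^h-2 occurring at least twice), A leaves every occurrence after the first at -1 because it writes only at q.index(v), while B returns the node's parent at every occurrence, which is the intended answer for each query. — e.g. on solution(2, [1, 1]): A returns [3, -1], B returns [3, 3]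
import Mathlib
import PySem

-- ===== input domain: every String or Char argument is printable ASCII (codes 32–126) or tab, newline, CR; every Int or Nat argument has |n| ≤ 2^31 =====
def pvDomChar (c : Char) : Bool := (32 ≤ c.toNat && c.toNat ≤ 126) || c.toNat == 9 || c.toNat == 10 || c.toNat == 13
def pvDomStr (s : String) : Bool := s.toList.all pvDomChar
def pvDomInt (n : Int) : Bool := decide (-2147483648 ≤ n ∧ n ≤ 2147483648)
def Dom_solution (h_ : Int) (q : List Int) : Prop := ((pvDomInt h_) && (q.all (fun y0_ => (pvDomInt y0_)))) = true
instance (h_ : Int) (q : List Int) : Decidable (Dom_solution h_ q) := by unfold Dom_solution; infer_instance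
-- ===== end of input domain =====

-- B computes each query's parent arithmetically by descending subtree value ranges from the root
-- instead of building the whole 2^h-node tree; on duplicated valid query values B answers every
-- occurrence (intended), A only the first — stated as D_solution below.


-- ===== PORT A =====
-- Python's Node/None tree: `none` is Python's None, `node v l r` a Node (not nested: children are direct).
inductive PyTree : Type
  | none : PyTree
  | node : Int → PyTree → PyTree → PyTree
deriving DecidableEq, Repr

def PyTree.size : PyTree → Nat
  | .none => 0
  | .node _ l r => 1 + l.size + r.size

-- tree(h, accumulated): value = 2**h - 1 + accumulated; Node(...) if h > 0 else None
-- (fuel = h.toNat only makes the recursion total; it never runs out: the depth is exactly h)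
def treeAFuel : Nat → Int → Int → PyTree
  | 0, _, _ => PyTree.none
  | (f+1), h, acc =>
    if 0 < h then
      PyTree.node ((2 : Int) ^ h.toNat - 1 + acc)
        (treeAFuel f (h - 1) acc)
        (treeAFuel f (h - 1) ((2 : Int) ^ (h - 1).toNat - 1 + acc))
    else PyTree.none

def treeA (h : Int) (acc : Int) : PyTree := treeAFuel h.toNat h acc

-- `if child.value in q: res[q.index(child.value)] = node.value` (membership ↔ index? is some)
def wrA (q res : List Int) (cv pv : Int) : List Int :=
  match PySem.List.index? q cv with
  | some i => res.set i pv
  | Option.none => res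

-- the while-loop over node_list (head of the Lean list = end of the Python list, where pop/append act);
-- Python appends left then right, so right ends on top: stack becomes right :: left :: rest.
-- (fuel only makes the loop total; solution passes 2*|tree|+1, enough for every iteration)
def loopA (q : List Int) : Nat → List PyTree → List Int → List Int
  | 0, _, res => res
  | (_+1), [], res => res
  | (f+1), PyTree.none :: rest, res => loopA q f rest res   -- unreachable under Pre_ (Python raises)
  | (f+1), PyTree.node v l r :: rest, res =>
    match l, r with
    | PyTree.none, PyTree.none => loopA q f rest res    -- leaf: continue
    | PyTree.none, PyTree.node rv rl rr =>
        loopA q f (PyTree.node rv rl rr :: rest) (wrA q res rv v)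
    | PyTree.node lv ll lr, PyTree.none =>
        loopA q f (PyTree.node lv ll lr :: rest) (wrA q res lv v)
    | PyTree.node lv ll lr, PyTree.node rv rl rr =>
        loopA q f (PyTree.node rv rl rr :: PyTree.node lv ll lr :: rest)
          (wrA q (wrA q res lv v) rv v)

def solution (h_ : Int) (q : List Int) : List Int :=
  loopA q (2 * (treeA h_ 0).size + 1) [treeA h_ 0] (List.replicate q.length (-1))

-- ===== PORT B =====
-- the `while k > 1` descent of Source B, fuel = k (k ≤ 1 falls through to `return -1`)
def descendB : Nat → Int → Int → Int
  | 0, _, _ => -1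
  | 1, _, _ => -1
  | (k + 2), a, x =>
    let lroot := a + (2 : Int) ^ (k + 1) - 1
    let cur := (2 : Int) ^ (k + 2) - 1 + a
    if x = lroot ∨ x = cur - 1 then cur
    else if lroot < x then descendB (k + 1) lroot x
    else descendB (k + 1) a x

def solution_alt (h_ : Int) (q : List Int) : List Int :=
  let size := (2 : Int) ^ h_.toNat - 1
  q.map (fun x => if x < 1 ∨ size ≤ x then -1 else descendB h_.toNat 0 x)

-- ===== PRECONDITION & SPEC =====
-- Pre_ excludes h ≤ 0, where tree(h) is None and A raises AttributeError on None.left.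
def Pre_solution (h_ : Int) (q : List Int) : Prop := 1 ≤ h_
instance (h_ : Int) (q : List Int) : Decidable (Pre_solution h_ q) := by unfold Pre_solution; infer_instance
def pvWitness_solution : Int × List Int := (3, [7, 3, 5])

-- On queries containing a duplicated valid non-root node value v (1 ≤ v ≤ 2^h-2, at least twice in q),
-- A returns -1 at every occurrence after the first (it writes only at q.index(v)) while B returns the
-- parent at every occurrence, which is the intended answer for each query.
def D_solution (h_ : Int) (q : List Int) : Prop :=
  ∃ v ∈ q, 1 ≤ v ∧ v ≤ (2 : Int) ^ h_.toNat - 2 ∧ 2 ≤ q.count v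
instance (h_ : Int) (q : List Int) : Decidable (D_solution h_ q) := by unfold D_solution; infer_instance

def Spec_solution (h_ : Int) (q : List Int) (out : List Int) : Prop :=
  ¬ D_solution h_ q → out = solution_alt h_ q
instance (h_ : Int) (q : List Int) (out : List Int) : Decidable (Spec_solution h_ q out) := by unfold Spec_solution; infer_instance

def pvDiffWitness_solution : Int × List Int := (2, [1, 1])
def pvDiffWitnessOut_solution : (List Int) × (List Int) := ([3, -1], [3, 3])

-- ===== CLAIM (what is proved, stated in full; the proofs are below) =====
def Claim_unchanged_solution : Prop := ∀ (h_ : Int) (q : List Int), Dom_solution h_ q → Pre_solution h_ q → Spec_solution h_ q (solution h_ q)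
def Claim_exact_solution : Prop := ∀ (h_ : Int) (q : List Int), Dom_solution h_ q → Pre_solution h_ q → D_solution h_ q → solution h_ q ≠ solution_alt h_ q
def Claim_changed_solution : Prop := Dom_solution (pvDiffWitness_solution.1) (pvDiffWitness_solution.2) ∧ Pre_solution (pvDiffWitness_solution.1) (pvDiffWitness_solution.2) ∧ D_solution (pvDiffWitness_solution.1) (pvDiffWitness_solution.2) ∧ solution (pvDiffWitness_solution.1) (pvDiffWitness_solution.2) = pvDiffWitnessOut_solution.1 ∧ solution_alt (pvDiffWitness_solution.1) (pvDiffWitness_solution.2) = pvDiffWitnessOut_solution.2 ∧ pvDiffWitnessOut_solution.1 ≠ pvDiffWitnessOut_solution.2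

-- ===== LEMMAS AND PROOFS =====-- proof-side definitions and lemmas
def treeN : Nat → Int → PyTree
  | 0, _ => PyTree.none
  | (k+1), a => PyTree.node ((2:Int)^(k+1) - 1 + a) (treeN k a) (treeN k ((2:Int)^k - 1 + a))

theorem treeN_succ (k : Nat) (a : Int) : treeN (k+1) a =
    PyTree.node ((2:Int)^(k+1) - 1 + a) (treeN k a) (treeN k ((2:Int)^k - 1 + a)) := rfl

theorem treeAFuel_eq : ∀ (f : Nat) (h a : Int), h.toNat ≤ f → treeAFuel f h a = treeN h.toNat a := by
  intro f
  induction f with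
  | zero =>
    intro h a hle
    have h0 : h.toNat = 0 := by omega
    rw [treeAFuel, h0, treeN]
  | succ f ih =>
    intro h a hle
    by_cases hp : 0 < h
    · have hn : h.toNat = (h - 1).toNat + 1 := by omega
      rw [treeAFuel, if_pos hp, hn, treeN_succ, ← hn,
        ih (h - 1) a (by omega), ih (h - 1) _ (by omega)]
    · have h0 : h.toNat = 0 := by omega
      rw [treeAFuel, if_neg hp, h0, treeN]

theorem treeA_eq (h a : Int) : treeA h a = treeN h.toNat a := treeAFuel_eq _ _ _ le_rfl

def chld (v : Int) : PyTree → List (Int × Int)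
  | PyTree.none => []
  | PyTree.node cv _ _ => [(cv, v)]

def edges : PyTree → List (Int × Int)
  | PyTree.none => []
  | PyTree.node v l r => chld v l ++ chld v r ++ edges r ++ edges l

theorem loopA_eq (q : List Int) : ∀ (f : Nat) (stack : List PyTree) (res : List Int),
    2 * (stack.map PyTree.size).sum + stack.length ≤ f →
    loopA q f stack res = ((stack.map edges).flatten).foldl (fun r vp => wrA q r vp.1 vp.2) res := by
  intro f
  induction f with
  | zero =>
    intro stack res hle
    match stack with
    | [] => rw [loopA]; simp
    | t :: rest => simp at hle
  | succ f ih =>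
    intro stack res hle
    match stack with
    | [] => rw [loopA]; simp
    | PyTree.none :: rest =>
      rw [loopA, ih rest res (by simp [PyTree.size] at hle ⊢; omega)]
      simp [edges]
    | PyTree.node v l r :: rest =>
      simp only [List.map_cons, List.sum_cons, PyTree.size, List.length_cons] at hle
      cases l <;> cases r
      · rw [loopA, ih rest res (by simp [PyTree.size] at hle ⊢; omega)]
        simp [edges, chld]
      · rw [loopA, ih _ _ (by simp [PyTree.size] at hle ⊢; omega)]
        simp [edges, chld, List.foldl_append]
      · rw [loopA, ih _ _ (by simp [PyTree.size] at hle ⊢; omega)]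
        simp [edges, chld, List.foldl_append]
      · rw [loopA, ih _ _ (by simp [PyTree.size] at hle ⊢; omega)]
        simp [edges, chld, List.foldl_append]

theorem wrA_length (q res : List Int) (cv pv : Int) : (wrA q res cv pv).length = res.length := by
  unfold wrA; cases PySem.List.index? q cv <;> simp

theorem foldl_wrA_length (q : List Int) : ∀ (P : List (Int × Int)) (res : List Int),
    (List.foldl (fun r vp => wrA q r vp.1 vp.2) res P).length = res.length := by
  intro P
  induction P with
  | nil => intro res; rfl
  | cons p P ih => intro res; simp [ih, wrA_length]

theorem foldl_wrA_getElem (q : List Int) : ∀ (P : List (Int × Int)) (res : List Int),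
    res.length = q.length → ∀ (i : Nat),
    (List.foldl (fun r vp => wrA q r vp.1 vp.2) res P)[i]? =
      (match P.reverse.find? (fun vp => PySem.List.index? q vp.1 == some i) with
       | some vp => some vp.2
       | none => res[i]?) := by
  intro P
  induction P with
  | nil => intro res hlen i; simp
  | cons p P ih =>
    intro res hlen i
    have hlen' : (wrA q res p.1 p.2).length = q.length := by rw [wrA_length]; exact hlen
    simp only [List.foldl_cons]
    rw [ih _ hlen' i]
    rw [List.reverse_cons, List.find?_append]
    cases hfind : P.reverse.find? (fun vp => PySem.List.index? q vp.1 == some i) with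
    | some vp => simp
    | none =>
      simp only [Option.none_or]
      unfold wrA
      cases hj : PySem.List.index? q p.1 with
      | none =>
        rw [PySem.List.index?_eq_idxOf?] at hj
        simp [List.find?, hj]
      | some j =>
        obtain ⟨hjlt, -, -⟩ := PySem.List.getElem_of_index?_eq_some hj
        rw [PySem.List.index?_eq_idxOf?] at hj
        by_cases hji : j = i
        · subst hji
          simp [List.find?, hj, hjlt.trans_eq hlen.symm]
        · have hb : (j == i) = false := by simpa using hji
          simp [List.find?, hj, hb, List.getElem?_set]
          exact fun h => absurd h hji

theorem chld_treeN_succ (v : Int) (k : Nat) (a : Int) :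
    chld v (treeN (k+1) a) = [((2:Int)^(k+1) - 1 + a, v)] := by rw [treeN_succ]; rfl

theorem edges_zero (a : Int) : edges (treeN 0 a) = [] := rfl

theorem edges_one (a : Int) : edges (treeN 1 a) = [] := rfl

theorem edges_succ (n : Nat) (a : Int) :
    edges (treeN (n+2) a) =
      ((2:Int)^(n+1) - 1 + a, (2:Int)^(n+2) - 1 + a)
      :: ((2:Int)^(n+1) - 1 + ((2:Int)^(n+1) - 1 + a), (2:Int)^(n+2) - 1 + a)
      :: (edges (treeN (n+1) ((2:Int)^(n+1) - 1 + a)) ++ edges (treeN (n+1) a)) := by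
  rw [treeN_succ (n+1) a, edges, chld_treeN_succ, chld_treeN_succ]
  simp

theorem edges_mem : ∀ (k : Nat) (a : Int) (vp : Int × Int), vp ∈ edges (treeN k a) →
    a + 1 ≤ vp.1 ∧ vp.1 ≤ (2:Int)^k - 2 + a ∧ vp.2 = descendB k a vp.1 := by
  intro k
  induction k using Nat.strong_induction_on with
  | _ k ih =>
    match k with
    | 0 => intro a vp h; rw [edges_zero] at h; cases h
    | 1 => intro a vp h; rw [edges_one] at h; cases h
    | (n+2) =>
      intro a vp hmem
      have hpow : (1:Int) ≤ 2^n := one_le_pow₀ (by norm_num)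
      have e1 : (2:Int)^(n+1) = 2 * 2^n := by ring
      have e2 : (2:Int)^(n+2) = 4 * 2^n := by ring
      have ha : a + (2:Int)^(n+1) - 1 = (2:Int)^(n+1) - 1 + a := by ring
      rw [edges_succ] at hmem
      simp only [List.mem_cons, List.mem_append] at hmem
      rcases hmem with h | h | h | h
      · subst h
        refine ⟨by omega, by omega, ?_⟩
        simp only [descendB]
        rw [if_pos (Or.inl (by ring))]
      · subst h
        refine ⟨by omega, by omega, ?_⟩
        simp only [descendB]
        rw [if_pos (Or.inr (by ring))]
      · -- vp ∈ edges of the RIGHT subtree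
        obtain ⟨hb1, hb2, hd⟩ := ih (n+1) (by omega) _ vp h
        refine ⟨by omega, by omega, ?_⟩
        simp only [descendB]
        rw [ha, if_neg (by omega), if_pos (by omega)]
        exact hd
      · -- vp ∈ edges of the LEFT subtree
        obtain ⟨hb1, hb2, hd⟩ := ih (n+1) (by omega) _ vp h
        refine ⟨by omega, by omega, ?_⟩
        simp only [descendB]
        rw [if_neg (by omega), if_neg (by omega)]
        exact hd

theorem edges_complete : ∀ (k : Nat) (a x : Int), a + 1 ≤ x → x ≤ (2:Int)^k - 2 + a →
    ∃ p, (x, p) ∈ edges (treeN k a) := by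
  intro k
  induction k using Nat.strong_induction_on with
  | _ k ih =>
    match k with
    | 0 => intro a x h1 h2; norm_num at h1 h2; omega
    | 1 => intro a x h1 h2; norm_num at h1 h2; omega
    | (n+2) =>
      intro a x h1 h2
      have hpow : (1:Int) ≤ 2^n := one_le_pow₀ (by norm_num)
      have e1 : (2:Int)^(n+1) = 2 * 2^n := by ring
      have e2 : (2:Int)^(n+2) = 4 * 2^n := by ring
      by_cases hl : x = (2:Int)^(n+1) - 1 + a
      · refine ⟨(2:Int)^(n+2) - 1 + a, ?_⟩
        rw [edges_succ, hl]
        exact List.mem_cons_self ..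
      by_cases hr : x = (2:Int)^(n+1) - 1 + ((2:Int)^(n+1) - 1 + a)
      · refine ⟨(2:Int)^(n+2) - 1 + a, ?_⟩
        rw [edges_succ, hr]
        exact List.mem_cons_of_mem _ (List.mem_cons_self ..)
      by_cases hlt : x < (2:Int)^(n+1) - 1 + a
      · have hx2 : x ≤ (2:Int)^(n+1) - 2 + a := by omega
        obtain ⟨p, hp⟩ := ih (n+1) (by omega) a x h1 hx2
        refine ⟨p, ?_⟩
        rw [edges_succ]
        exact List.mem_cons_of_mem _ (List.mem_cons_of_mem _ (List.mem_append_right _ hp))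
      · have hx1 : ((2:Int)^(n+1) - 1 + a) + 1 ≤ x := by omega
        have hx2 : x ≤ (2:Int)^(n+1) - 2 + ((2:Int)^(n+1) - 1 + a) := by omega
        obtain ⟨p, hp⟩ := ih (n+1) (by omega) ((2:Int)^(n+1) - 1 + a) x hx1 hx2
        refine ⟨p, ?_⟩
        rw [edges_succ]
        exact List.mem_cons_of_mem _ (List.mem_cons_of_mem _ (List.mem_append_left _ hp))

theorem two_le_count_of_dup (q : List Int) (j i : Nat) (hji : j < i) (hi : i < q.length)
    (hx : q[j]'(lt_trans hji hi) = q[i]'hi) : 2 ≤ q.count (q[i]'hi) := by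
  have hmem1 : q[i]'hi ∈ q.take (j+1) := by
    have hjt : j < (q.take (j+1)).length := by simp; omega
    have : (q.take (j+1))[j]'hjt = q[i]'hi := by rw [List.getElem_take]; exact hx
    exact this ▸ List.getElem_mem hjt
  have hmem2 : q[i]'hi ∈ q.drop (j+1) := by
    have hdt : i - (j+1) < (q.drop (j+1)).length := by simp; omega
    have : (q.drop (j+1))[i - (j+1)]'hdt = q[i]'hi := by
      rw [List.getElem_drop]
      congr 1
      omega
    exact this ▸ List.getElem_mem hdt
  have h1 : 0 < (q.take (j+1)).count (q[i]'hi) := List.count_pos_iff.mpr hmem1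
  have h2 : 0 < (q.drop (j+1)).count (q[i]'hi) := List.count_pos_iff.mpr hmem2
  have := List.take_append_drop (j+1) q
  calc 2 ≤ (q.take (j+1)).count (q[i]'hi) + (q.drop (j+1)).count (q[i]'hi) := by omega
  _ = ((q.take (j+1)) ++ (q.drop (j+1))).count (q[i]'hi) := (List.count_append ..).symm
  _ = q.count (q[i]'hi) := by rw [this]

theorem descendB_pos : ∀ (k : Nat) (a x : Int), a + 1 ≤ x → x ≤ (2:Int)^k - 2 + a →
    a + 3 ≤ descendB k a x := by
  intro k
  induction k using Nat.strong_induction_on with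
  | _ k ih =>
    match k with
    | 0 => intro a x h1 h2; norm_num at h1 h2; omega
    | 1 => intro a x h1 h2; norm_num at h1 h2; omega
    | (n+2) =>
      intro a x h1 h2
      have hpow : (1:Int) ≤ 2^n := one_le_pow₀ (by norm_num)
      have e1 : (2:Int)^(n+1) = 2 * 2^n := by ring
      have e2 : (2:Int)^(n+2) = 4 * 2^n := by ring
      simp only [descendB]
      split_ifs with hif hlt
      · omega
      · rw [not_or] at hif
        have := ih (n+1) (by omega) (a + 2^(n+1) - 1) x (by omega) (by omega)
        omega
      · rw [not_or] at hif
        have := ih (n+1) (by omega) a x h1 (by omega)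
        omega

theorem solution_eq_foldl (h_ : Int) (q : List Int) :
    solution h_ q = List.foldl (fun r vp => wrA q r vp.1 vp.2)
      (List.replicate q.length (-1)) (edges (treeN h_.toNat 0)) := by
  rw [solution, loopA_eq q _ _ _ (by simp), treeA_eq]
  simp

theorem main_eq (h_ : Int) (q : List Int) (hnd : ¬ D_solution h_ q) :
    solution h_ q = solution_alt h_ q := by
  apply List.ext_getElem?
  intro i
  by_cases hi : i < q.length
  · rw [solution_eq_foldl, foldl_wrA_getElem q _ _ (by simp) i]
    have hpow : (1:Int) ≤ 2 ^ h_.toNat := one_le_pow₀ (by norm_num)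
    have hB : (solution_alt h_ q)[i]? =
        some (if q[i]'hi < 1 ∨ (2:Int)^h_.toNat - 1 ≤ q[i]'hi then (-1:Int)
              else descendB h_.toNat 0 (q[i]'hi)) := by
      simp [solution_alt, List.getElem?_map, List.getElem?_eq_getElem hi]
    rw [hB]
    by_cases hv : 1 ≤ q[i]'hi ∧ q[i]'hi ≤ (2:Int)^h_.toNat - 2
    · -- valid child value: A writes descendB at the first occurrence, which must be i (¬D)
      have hmem : q[i]'hi ∈ q := List.getElem_mem hi
      obtain ⟨j, hj⟩ : ∃ j, PySem.List.index? q (q[i]'hi) = some j := by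
        cases hjo : PySem.List.index? q (q[i]'hi) with
        | none => exact absurd hmem ((PySem.List.index?_eq_none_iff q _).mp hjo)
        | some j => exact ⟨j, rfl⟩
      obtain ⟨hjlt, hqj, hfirst⟩ := PySem.List.getElem_of_index?_eq_some hj
      have hji : j = i := by
        by_contra hne
        have hjli : j < i := by
          rcases lt_trichotomy j i with h' | h' | h'
          · exact h'
          · exact absurd h' hne
          · exact absurd hqj (by simpa using hfirst i h')
        exact hnd ⟨q[i]'hi, hmem, hv.1, hv.2, two_le_count_of_dup q j i hjli hi hqj⟩
      subst hji
      obtain ⟨p, hp⟩ := edges_complete h_.toNat 0 (q[j]'hi) (by omega) (by linarith [hv.2])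
      cases hfind : (edges (treeN h_.toNat 0)).reverse.find?
          (fun vp => PySem.List.index? q vp.1 == some j) with
      | none =>
        exfalso
        have hnp := List.find?_eq_none.mp hfind (q[j]'hi, p) (List.mem_reverse.mpr hp)
        rw [PySem.List.index?_eq_idxOf?] at hj
        simp [hj] at hnp
      | some vp =>
        have hpred : PySem.List.index? q vp.1 = some j := by
          have := List.find?_some hfind
          simpa using this
        obtain ⟨ha1, hq1, ha2⟩ := PySem.List.getElem_of_index?_eq_some hpred
        have hv1 : vp.1 = q[j]'hi := hq1.symm
        obtain ⟨hc1, hc2, hd⟩ := edges_mem h_.toNat 0 vp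
          (List.mem_reverse.mp (List.mem_of_find?_eq_some hfind))
        rw [if_neg (by push_neg; exact ⟨by omega, by linarith [hv.2]⟩)]
        show some vp.2 = some (descendB h_.toNat 0 (q[j]'hi))
        rw [hd, hv1]
    · -- not a valid child value: A leaves -1, B returns -1
      cases hfind : (edges (treeN h_.toNat 0)).reverse.find?
          (fun vp => PySem.List.index? q vp.1 == some i) with
      | some vp =>
        exfalso
        have hpred : PySem.List.index? q vp.1 = some i := by
          have := List.find?_some hfind
          simpa using this
        obtain ⟨ha1, hq1, ha2⟩ := PySem.List.getElem_of_index?_eq_some hpred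
        obtain ⟨hb1, hb2, -⟩ := edges_mem h_.toNat 0 vp
          (List.mem_reverse.mp (List.mem_of_find?_eq_some hfind))
        rw [← hq1] at hb1 hb2
        exact hv ⟨by omega, by linarith [hb2]⟩
      | none =>
        have hcond : q[i]'hi < 1 ∨ (2:Int)^h_.toNat - 1 ≤ q[i]'hi := by
          by_contra hc
          push_neg at hc
          exact hv ⟨by omega, by linarith [hc.2]⟩
        rw [if_pos hcond]
        simp [hi]
  · rw [List.getElem?_eq_none, List.getElem?_eq_none]
    · simp [solution_alt]; omega
    · rw [solution_eq_foldl, foldl_wrA_length]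
      simp; omega

-- ===== VERDICT (by name: the statement is the Claim_ definition above) =====
theorem solution_spec : Claim_unchanged_solution := by
  intro h_ q _hdom _hpre hnd
  exact main_eq h_ q hnd

theorem solution_changed : Claim_changed_solution := by
  unfold Claim_changed_solution
  refine ⟨by decide, by decide, by decide, ?_, ?_, by decide⟩
  · show solution 2 [1, 1] = [3, -1]
    decide
  · show solution_alt 2 [1, 1] = [3, 3]
    decide

theorem solution_tight : Claim_exact_solution := by
  intro h_ q _hdom _hpre hD heq
  obtain ⟨v, hvmem, hv1, hv2, hcnt⟩ := hD
  have hpow : (1:Int) ≤ 2 ^ h_.toNat := one_le_pow₀ (by norm_num)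
  obtain ⟨j, hj⟩ : ∃ j, PySem.List.index? q v = some j := by
    cases hjo : PySem.List.index? q v with
    | none => exact absurd hvmem ((PySem.List.index?_eq_none_iff q _).mp hjo)
    | some j => exact ⟨j, rfl⟩
  obtain ⟨hjlt, hqj, hfirst⟩ := PySem.List.getElem_of_index?_eq_some hj
  -- the first j+1 entries contain exactly one copy of v, so a second copy lives in the tail
  have htake : (q.take (j+1)).count v = 1 := by
    rw [List.take_succ, List.count_append, List.getElem?_eq_getElem hjlt]
    have h0 : (q.take j).count v = 0 := by
      rw [List.count_eq_zero]
      intro hmem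
      obtain ⟨m, hmlt, hqm⟩ := List.getElem_of_mem hmem
      have hmj : m < j := by
        have hlen := hmlt
        simp [List.length_take] at hlen
        omega
      rw [List.getElem_take] at hqm
      exact hfirst m hmj hqm
    simp [h0, hqj]
  have hdrop : 0 < (q.drop (j+1)).count v := by
    have hsplit := List.take_append_drop (j+1) q
    have : q.count v = (q.take (j+1)).count v + (q.drop (j+1)).count v := by
      conv_lhs => rw [← hsplit]
      exact List.count_append ..
    omega
  obtain ⟨m, hmlt, hqm⟩ := List.getElem_of_mem (List.count_pos_iff.mp hdrop)
  rw [List.getElem_drop] at hqm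
  have hilt : j + 1 + m < q.length := by
    have hlen := hmlt
    simp [List.length_drop] at hlen
    omega
  -- A returns -1 at the second occurrence, B returns the parent (≥ 3)
  have hA : (solution h_ q)[j+1+m]? = some (-1) := by
    rw [solution_eq_foldl, foldl_wrA_getElem q _ _ (by simp) (j+1+m)]
    cases hfind : (edges (treeN h_.toNat 0)).reverse.find?
        (fun vp => PySem.List.index? q vp.1 == some (j+1+m)) with
    | some vp =>
      exfalso
      have hpred : PySem.List.index? q vp.1 = some (j+1+m) := by
        have := List.find?_some hfind
        simpa using this
      obtain ⟨hx1, hx2, hx3⟩ := PySem.List.getElem_of_index?_eq_some hpred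
      rw [hqm] at hx2
      rw [← hx2] at hpred
      rw [hj] at hpred
      have : j = j + 1 + m := by simpa using hpred
      omega
    | none => simp [hilt]
  have hB : (solution_alt h_ q)[j+1+m]? = some (descendB h_.toNat 0 v) := by
    simp only [solution_alt, List.getElem?_map, List.getElem?_eq_getElem hilt, hqm,
      Option.map_some]
    rw [if_neg (by push_neg; exact ⟨by omega, by linarith [hv2]⟩)]
  have hge := descendB_pos h_.toNat 0 v (by omega) (by linarith [hv2])
  rw [heq, hB] at hA
  have : descendB h_.toNat 0 v = -1 := by simpa using hA
  omega
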